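-- pv_equiv track=rewrite | github.com/mgillr/crdt-merge | crdt_merge/e4/proof_evidence.py | _clock_is_before
-- ===== SOURCE A (Python) =====
-- def _clock_is_before(a: dict, b: dict) -> bool:
--     """True if clock *a* is strictly causally before *b*."""
--     all_peers = set(a) | set(b)
--     at_least_one_less = False
--     for p in all_peers:
--         va = a.get(p, 0)
--         vb = b.get(p, 0)
--         if va > vb:
--             return False
--         if va < vb:
--             at_least_one_less = True
--     return at_least_one_less
-- ===== SOURCE B (Python) =====
-- def _clock_is_before(a: dict, b: dict) -> bool:
--     """True if clock *a* is strictly causally before *b*."""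
--     # Normalise away explicit zero entries: a missing peer and a stored 0 are the same clock.
--     na = {p: v for p, v in a.items() if v != 0}
--     nb = {p: v for p, v in b.items() if v != 0}
--     for p, v in na.items():
--         if v > nb.get(p, 0):
--             return False
--     for p, v in nb.items():
--         if v < na.get(p, 0):
--             return False
--     # a <= b componentwise; strictness is exactly inequality of the normalised clocks.
--     return na != nb
-- ===== Notes on version B (the rewrite author's own statement) =====
-- stated objective: alternative
-- what changed: Instead of scanning the peer union with a running strictness flag, B normalises both clocks by dropping explicit zero entries, checks each normalised dict's own items for a componentwise violation (no peer-union set is built), and derives strictness from dict inequality na != nb of the normalised clocks.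
import Mathlib
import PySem

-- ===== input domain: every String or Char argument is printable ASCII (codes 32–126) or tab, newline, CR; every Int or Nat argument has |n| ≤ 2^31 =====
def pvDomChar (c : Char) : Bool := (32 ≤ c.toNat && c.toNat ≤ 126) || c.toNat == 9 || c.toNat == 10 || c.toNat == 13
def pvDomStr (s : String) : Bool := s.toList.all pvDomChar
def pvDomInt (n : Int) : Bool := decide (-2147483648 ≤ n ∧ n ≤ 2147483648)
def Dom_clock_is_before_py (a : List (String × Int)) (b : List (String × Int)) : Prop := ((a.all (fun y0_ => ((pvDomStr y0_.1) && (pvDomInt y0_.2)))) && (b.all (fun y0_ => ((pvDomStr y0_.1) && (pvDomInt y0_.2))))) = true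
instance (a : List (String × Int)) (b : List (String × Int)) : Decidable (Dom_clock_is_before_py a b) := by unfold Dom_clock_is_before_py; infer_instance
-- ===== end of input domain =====

-- B drops explicit zero entries from both clocks, checks each normalised dict's own items for a
-- componentwise violation (no peer-union set), and gets strictness from dict inequality na != nb;
-- objective: alternative formulation, same O(n) cost. Return-value equivalence is proved.

-- d.get(p, 0) on a dict (first-match association list)
def pvGet0 (d : List (String × Int)) (p : String) : Int :=
  (PySem.Dict.mk d).getD p 0

-- ===== PORT A =====
-- the for-loop of A: state = at_least_one_less flag; 'return False' = stop with false
def clockALoop (a b : List (String × Int)) : List String → Bool → Bool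
  | [], flag => flag
  | p :: rest, flag =>
    let va := pvGet0 a p
    let vb := pvGet0 b p
    if va > vb then false
    else if va < vb then clockALoop a b rest true
    else clockALoop a b rest flag

def clock_is_before_py (a : List (String × Int)) (b : List (String × Int)) : Bool :=
  let all_peers := PySem.Set.union (PySem.Set.ofList (a.map Prod.fst)) (b.map Prod.fst)
  clockALoop a b all_peers false

-- ===== PORT B =====
-- the dict comprehension {p: v for p, v in d.items() if v != 0}
def pvNorm (d : List (String × Int)) : PySem.Dict String Int :=
  d.foldl (fun acc kv => if kv.2 ≠ 0 then acc.insert kv.1 kv.2 else acc) PySem.Dict.empty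

-- Python dict equality na == nb (order-insensitive): same key set and same value at every key;
-- exact for PySem.Dict (unique keys), per the PYSEM note on porting dict '=='
def pyDictEq (x y : PySem.Dict String Int) : Bool :=
  PySem.Set.equal (PySem.Set.ofList x.keys) (PySem.Set.ofList y.keys) &&
  x.items.all (fun kv => y.get? kv.1 == some kv.2)

def clock_is_before_py_alt (a : List (String × Int)) (b : List (String × Int)) : Bool :=
  let na := pvNorm a
  let nb := pvNorm b
  -- first for-loop with early 'return False'
  if na.items.any (fun kv => kv.2 > nb.getD kv.1 0) then false
  -- second for-loop with early 'return False'
  else if nb.items.any (fun kv => kv.2 < na.getD kv.1 0) then false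
  else !(pyDictEq na nb)

-- ===== PRECONDITION & SPEC =====
-- Pre_ excludes association lists with duplicate keys: the parameters are Python dicts, which can
-- never contain a duplicate key, so no actual Python input is excluded.
def Pre_clock_is_before_py (a : List (String × Int)) (b : List (String × Int)) : Prop :=
  (a.map Prod.fst).Nodup ∧ (b.map Prod.fst).Nodup
instance (a : List (String × Int)) (b : List (String × Int)) : Decidable (Pre_clock_is_before_py a b) := by unfold Pre_clock_is_before_py; infer_instance
def pvWitness_clock_is_before_py : (List (String × Int)) × (List (String × Int)) :=
  ([("n1", 1)], [("n1", 2), ("n2", 1)])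

def Spec_clock_is_before_py (a : List (String × Int)) (b : List (String × Int)) (out : Bool) : Prop := out = clock_is_before_py_alt a b
instance (a : List (String × Int)) (b : List (String × Int)) (out : Bool) : Decidable (Spec_clock_is_before_py a b out) := by unfold Spec_clock_is_before_py; infer_instance

-- ===== CLAIM (what is proved, stated in full; the proofs are below) =====
def Claim_equal_clock_is_before_py : Prop := ∀ (a : List (String × Int)) (b : List (String × Int)), Dom_clock_is_before_py a b → Pre_clock_is_before_py a b → Spec_clock_is_before_py a b (clock_is_before_py a b)

-- ===== LEMMAS AND PROOFS =====

theorem clockA_def (a b : List (String × Int)) :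
    clock_is_before_py a b =
      clockALoop a b (PySem.Set.union (PySem.Set.ofList (a.map Prod.fst)) (b.map Prod.fst)) false := rfl

theorem clockB_def (a b : List (String × Int)) :
    clock_is_before_py_alt a b =
      (if (pvNorm a).items.any (fun kv => kv.2 > (pvNorm b).getD kv.1 0) then false
       else if (pvNorm b).items.any (fun kv => kv.2 < (pvNorm a).getD kv.1 0) then false
       else !(pyDictEq (pvNorm a) (pvNorm b))) := rfl

-- A's loop is 'all ≤ on the list && (flag || any <)'
theorem clockALoop_eq (a b : List (String × Int)) (ps : List String) (flag : Bool) :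
    clockALoop a b ps flag =
      (ps.all (fun p => pvGet0 a p ≤ pvGet0 b p) &&
        (flag || ps.any (fun p => pvGet0 a p < pvGet0 b p))) := by
  induction ps generalizing flag with
  | nil => simp [clockALoop]
  | cons p rest ih =>
    simp only [clockALoop, List.all_cons, List.any_cons]
    by_cases hgt : pvGet0 a p > pvGet0 b p
    · simp [hgt, show ¬ (pvGet0 a p ≤ pvGet0 b p) from not_le.mpr hgt]
    · by_cases hlt : pvGet0 a p < pvGet0 b p
      · simp [hgt, hlt, ih, le_of_lt hlt]
      · simp [hgt, hlt, ih, le_of_not_gt hgt]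

theorem pvGet0_nil (p : String) : pvGet0 [] p = 0 := rfl

-- dict.get on a cons cell
theorem pvGet0_cons (k : String) (v : Int) (rest : List (String × Int)) (p : String) :
    pvGet0 ((k, v) :: rest) p = if k = p then v else pvGet0 rest p := by
  simp only [pvGet0, PySem.Dict.getD_eq_get?_getD, PySem.Dict.get?_mk_cons]
  by_cases h : k = p <;> simp [h]

-- lookup of an absent key is 0
theorem pvGet0_of_not_mem (d : List (String × Int)) (p : String)
    (h : p ∉ d.map Prod.fst) : pvGet0 d p = 0 := by
  induction d with
  | nil => exact pvGet0_nil p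
  | cons kv rest ih =>
    simp only [List.map_cons, List.mem_cons, not_or] at h
    rw [show kv = (kv.1, kv.2) from rfl, pvGet0_cons, if_neg (fun he => h.1 he.symm)]
    exact ih h.2

-- lookup of a present key (unique keys)
theorem pvGet0_of_mem (d : List (String × Int)) (k : String) (v : Int)
    (hnd : (d.map Prod.fst).Nodup) (h : (k, v) ∈ d) : pvGet0 d k = v := by
  induction d with
  | nil => cases h
  | cons kv rest ih =>
    simp only [List.map_cons, List.nodup_cons] at hnd
    rw [show kv = (kv.1, kv.2) from rfl, pvGet0_cons]
    rcases List.mem_cons.mp h with he | hm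
    · have h1 : k = kv.1 := congrArg Prod.fst he
      have h2 : v = kv.2 := congrArg Prod.snd he
      rw [if_pos h1.symm, h2]
    · rw [if_neg (fun he2 : kv.1 = k => hnd.1 (by rw [he2]; exact List.mem_map.mpr ⟨(k, v), hm, rfl⟩))]
      exact ih hnd.2 hm

-- a lookup with value v ≠ 0 comes from an entry of the list
theorem mem_of_pvGet0_eq (d : List (String × Int)) (p : String) (v : Int)
    (he : pvGet0 d p = v) (h : v ≠ 0) : (p, v) ∈ d := by
  induction d with
  | nil => rw [pvGet0_nil] at he; exact absurd he.symm h
  | cons kv rest ih =>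
    rw [show kv = (kv.1, kv.2) from rfl, pvGet0_cons] at he
    by_cases hp : kv.1 = p
    · rw [if_pos hp] at he
      exact List.mem_cons.mpr (Or.inl (by rw [← hp, ← he]))
    · rw [if_neg hp] at he
      exact List.mem_cons_of_mem _ (ih he)

theorem mem_of_pvGet0_ne (d : List (String × Int)) (p : String)
    (h : pvGet0 d p ≠ 0) : (p, pvGet0 d p) ∈ d :=
  mem_of_pvGet0_eq d p _ rfl h

-- get? on a literal dict, of a present key (unique keys)
theorem get?_mk_of_mem (d : List (String × Int)) (k : String) (v : Int)
    (hnd : (d.map Prod.fst).Nodup) (h : (k, v) ∈ d) :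
    (PySem.Dict.mk d).get? k = some v := by
  induction d with
  | nil => cases h
  | cons kv rest ih =>
    simp only [List.map_cons, List.nodup_cons] at hnd
    rw [show kv = (kv.1, kv.2) from rfl, PySem.Dict.get?_mk_cons]
    rcases List.mem_cons.mp h with he | hm
    · have h1 : k = kv.1 := congrArg Prod.fst he
      have h2 : v = kv.2 := congrArg Prod.snd he
      rw [if_pos (by simp [h1]), h2]
    · rw [if_neg (by
        simp only [beq_iff_eq]
        exact fun he2 => hnd.1 (he2 ▸ List.mem_map.mpr ⟨(k, v), hm, rfl⟩))]
      exact ih hnd.2 hm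

-- get? on a literal dict only returns entries of the list
theorem mem_of_get?_mk (d : List (String × Int)) (k : String) (v : Int)
    (h : (PySem.Dict.mk d).get? k = some v) : (k, v) ∈ d := by
  induction d with
  | nil => simp [show (PySem.Dict.mk ([] : List (String × Int))).get? k = none from rfl] at h
  | cons kv rest ih =>
    rw [show kv = (kv.1, kv.2) from rfl, PySem.Dict.get?_mk_cons] at h
    by_cases hp : kv.1 = k
    · rw [if_pos (by simp [hp])] at h
      have h2 : kv.2 = v := Option.some.inj h
      exact List.mem_cons.mpr (Or.inl (by rw [← hp, ← h2]))
    · rw [if_neg (by simp [hp])] at h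
      exact List.mem_cons_of_mem _ (ih h)

-- lookup in the zero-filtered list = lookup in the original (unique keys)
theorem pvGet0_filter (d : List (String × Int)) (hnd : (d.map Prod.fst).Nodup) (p : String) :
    pvGet0 (d.filter (fun kv => kv.2 ≠ 0)) p = pvGet0 d p := by
  induction d with
  | nil => simp
  | cons kv rest ih =>
    simp only [List.map_cons, List.nodup_cons] at hnd
    by_cases hz : kv.2 = 0
    · rw [List.filter_cons_of_neg (by simp [hz]), ih hnd.2,
        show kv = (kv.1, kv.2) from rfl, pvGet0_cons]
      by_cases hp : kv.1 = p
      · rw [if_pos hp, hz, ← hp]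
        exact pvGet0_of_not_mem rest kv.1 hnd.1
      · rw [if_neg hp]
    · rw [List.filter_cons_of_pos (by simp [hz]),
        show kv = (kv.1, kv.2) from rfl, pvGet0_cons, pvGet0_cons]
      by_cases hp : kv.1 = p
      · simp [hp]
      · rw [if_neg hp, if_neg hp, ih hnd.2]

-- a key survives the zero filter iff its lookup is nonzero (unique keys)
theorem mem_keys_filter (d : List (String × Int)) (hnd : (d.map Prod.fst).Nodup) (p : String) :
    (p ∈ (d.filter (fun kv => kv.2 ≠ 0)).map Prod.fst) ↔ pvGet0 d p ≠ 0 := by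
  constructor
  · intro h
    obtain ⟨kv, hkv, hp⟩ := List.mem_map.mp h
    have hmem := List.mem_of_mem_filter hkv
    have hz : kv.2 ≠ 0 := by simpa using List.of_mem_filter hkv
    have : pvGet0 d p = kv.2 := by
      subst hp; exact pvGet0_of_mem d kv.1 kv.2 hnd (by simpa using hmem)
    rw [this]; exact hz
  · intro h
    exact List.mem_map.mpr ⟨(p, pvGet0 d p),
      List.mem_filter.mpr ⟨mem_of_pvGet0_ne d p h, by simp [h]⟩, rfl⟩

theorem pvNormAux (l : List (String × Int)) (acc : PySem.Dict String Int)
    (hfresh : ∀ kv ∈ l, acc.contains kv.1 = false) (hnd : (l.map Prod.fst).Nodup) :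
    (l.foldl (fun acc kv => if kv.2 ≠ 0 then acc.insert kv.1 kv.2 else acc) acc).items =
      acc.items ++ l.filter (fun kv => kv.2 ≠ 0) := by
  induction l generalizing acc with
  | nil => simp
  | cons kv rest ih =>
    simp only [List.map_cons, List.nodup_cons] at hnd
    simp only [List.foldl_cons]
    by_cases hz : kv.2 = 0
    · rw [if_neg (by simp [hz]), List.filter_cons_of_neg (by simp [hz])]
      exact ih acc (fun p hp => hfresh p (List.mem_cons_of_mem _ hp)) hnd.2
    · rw [if_pos (by simp [hz]), List.filter_cons_of_pos (by simp [hz])]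
      have hc : acc.contains kv.1 = false := hfresh kv (by simp)
      have hfresh2 : ∀ p ∈ rest, (acc.insert kv.1 kv.2).contains p.1 = false := by
        intro p hp
        rw [PySem.Dict.contains_insert]
        have hne : p.1 ≠ kv.1 := fun he => hnd.1 (he ▸ List.mem_map.mpr ⟨p, hp, rfl⟩)
        simp [hne, hfresh p (List.mem_cons_of_mem _ hp)]
      rw [ih _ hfresh2 hnd.2, PySem.Dict.items_insert_of_not_contains _ _ hc]
      simp

-- the comprehension equals the zero-filtered list, as a dict (unique keys)
theorem pvNorm_eq (d : List (String × Int)) (hnd : (d.map Prod.fst).Nodup) :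
    pvNorm d = PySem.Dict.mk (d.filter (fun kv => kv.2 ≠ 0)) := by
  apply PySem.Dict.ext
  rw [show (PySem.Dict.mk (d.filter (fun kv => kv.2 ≠ 0))).items
        = d.filter (fun kv => kv.2 ≠ 0) from rfl]
  unfold pvNorm
  rw [pvNormAux d PySem.Dict.empty (fun kv _ => by simp) hnd]
  simp [PySem.Dict.empty]

-- A in terms of lookups
theorem A_iff (a b : List (String × Int)) :
    clock_is_before_py a b = true ↔
      (∀ p, pvGet0 a p ≤ pvGet0 b p) ∧ (∃ p, pvGet0 a p < pvGet0 b p) := by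
  rw [clockA_def, clockALoop_eq]
  simp only [Bool.false_or, Bool.and_eq_true, List.all_eq_true, List.any_eq_true,
    decide_eq_true_eq]
  have hmem : ∀ p : String,
      p ∈ PySem.Set.union (PySem.Set.ofList (a.map Prod.fst)) (b.map Prod.fst) ↔
        p ∈ a.map Prod.fst ∨ p ∈ b.map Prod.fst := by
    intro p
    rw [PySem.Set.mem_union, PySem.Set.mem_ofList]
  constructor
  · rintro ⟨h1, p, hp, hlt⟩
    refine ⟨fun q => ?_, p, hlt⟩
    by_cases hq : q ∈ PySem.Set.union (PySem.Set.ofList (a.map Prod.fst)) (b.map Prod.fst)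
    · exact h1 q hq
    · rw [hmem q, not_or] at hq
      rw [pvGet0_of_not_mem a q hq.1, pvGet0_of_not_mem b q hq.2]
  · rintro ⟨h1, p, hlt⟩
    refine ⟨fun q _ => h1 q, p, ?_, hlt⟩
    rw [hmem p]
    by_contra hn
    rw [not_or] at hn
    rw [pvGet0_of_not_mem a p hn.1, pvGet0_of_not_mem b p hn.2] at hlt
    exact lt_irrefl 0 hlt

-- the dict-equality test in terms of lookups (unique keys)
theorem pyDictEq_iff (a b : List (String × Int))
    (hna : (a.map Prod.fst).Nodup) (hnb : (b.map Prod.fst).Nodup) :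
    pyDictEq (PySem.Dict.mk (a.filter (fun kv => kv.2 ≠ 0)))
             (PySem.Dict.mk (b.filter (fun kv => kv.2 ≠ 0))) = true ↔
      ∀ p, pvGet0 a p = pvGet0 b p := by
  have hndB : ((b.filter (fun kv => kv.2 ≠ 0)).map Prod.fst).Nodup :=
    (List.filter_sublist.map Prod.fst).nodup hnb
  unfold pyDictEq
  simp only [Bool.and_eq_true, PySem.Set.equal_iff, PySem.Set.mem_ofList,
    List.all_eq_true, beq_iff_eq, PySem.Dict.keys_mk]
  constructor
  · rintro ⟨hkeys, hall⟩ p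
    by_cases hz : pvGet0 a p = 0
    · rw [hz]
      by_contra hb
      have hb2 : pvGet0 b p ≠ 0 := fun h => hb h.symm
      have h1 : p ∈ (b.filter (fun kv => kv.2 ≠ 0)).map Prod.fst :=
        (mem_keys_filter b hnb p).mpr hb2
      have h2 := (mem_keys_filter a hna p).mp (by
        have := (hkeys p).mpr (by simpa using h1)
        simpa using this)
      exact h2 hz
    · have hmem : (p, pvGet0 a p) ∈ a.filter (fun kv => kv.2 ≠ 0) :=
        List.mem_filter.mpr ⟨mem_of_pvGet0_ne a p hz, by simp [hz]⟩
      have hget : (PySem.Dict.mk (b.filter (fun kv => kv.2 ≠ 0))).get? p = some (pvGet0 a p) := by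
        simpa using hall _ (by simpa using hmem)
      have hmem2 : (p, pvGet0 a p) ∈ b.filter (fun kv => kv.2 ≠ 0) :=
        mem_of_get?_mk _ p _ hget
      exact (pvGet0_of_mem b p (pvGet0 a p) hnb (List.mem_of_mem_filter hmem2)).symm
  · intro h
    refine ⟨fun p => ?_, fun kv hkv => ?_⟩
    · have : (p ∈ (a.filter (fun kv => kv.2 ≠ 0)).map Prod.fst) ↔
          (p ∈ (b.filter (fun kv => kv.2 ≠ 0)).map Prod.fst) := by
        rw [mem_keys_filter a hna p, mem_keys_filter b hnb p, h p]
      simpa using this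
    · have hkv2 : kv ∈ a.filter (fun kv => kv.2 ≠ 0) := by simpa using hkv
      have hv : kv.2 = pvGet0 a kv.1 :=
        (pvGet0_of_mem a kv.1 kv.2 hna (by simpa using List.mem_of_mem_filter hkv2)).symm
      have hz : pvGet0 b kv.1 ≠ 0 := by
        rw [← h kv.1, ← hv]
        simpa using List.of_mem_filter hkv2
      have hmemb : (kv.1, pvGet0 b kv.1) ∈ b.filter (fun kv => kv.2 ≠ 0) :=
        List.mem_filter.mpr ⟨mem_of_pvGet0_ne b kv.1 hz, by simp [hz]⟩
      rw [get?_mk_of_mem _ kv.1 (pvGet0 b kv.1) hndB hmemb, hv, h kv.1]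

-- B in terms of lookups (unique keys)
theorem B_iff (a b : List (String × Int))
    (hna : (a.map Prod.fst).Nodup) (hnb : (b.map Prod.fst).Nodup) :
    clock_is_before_py_alt a b = true ↔
      (∀ p, pvGet0 a p ≤ pvGet0 b p) ∧ (∃ p, pvGet0 a p ≠ pvGet0 b p) := by
  rw [clockB_def, pvNorm_eq a hna, pvNorm_eq b hnb,
    show (PySem.Dict.mk (a.filter (fun kv => kv.2 ≠ 0))).items
      = a.filter (fun kv => kv.2 ≠ 0) from rfl,
    show (PySem.Dict.mk (b.filter (fun kv => kv.2 ≠ 0))).items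
      = b.filter (fun kv => kv.2 ≠ 0) from rfl]
  have hgdA : ∀ p, (PySem.Dict.mk (a.filter (fun kv => kv.2 ≠ 0))).getD p 0 = pvGet0 a p :=
    fun p => pvGet0_filter a hna p
  have hgdB : ∀ p, (PySem.Dict.mk (b.filter (fun kv => kv.2 ≠ 0))).getD p 0 = pvGet0 b p :=
    fun p => pvGet0_filter b hnb p
  have hany1 : ((a.filter (fun kv => kv.2 ≠ 0)).any
      (fun kv => kv.2 > (PySem.Dict.mk (b.filter (fun kv => kv.2 ≠ 0))).getD kv.1 0)) = false ↔
      ∀ p, pvGet0 a p ≠ 0 → pvGet0 a p ≤ pvGet0 b p := by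
    rw [List.any_eq_false]
    constructor
    · intro h p hp
      have hmem : (p, pvGet0 a p) ∈ a.filter (fun kv => kv.2 ≠ 0) :=
        List.mem_filter.mpr ⟨mem_of_pvGet0_ne a p hp, by simp [hp]⟩
      have := h _ hmem
      simp only [hgdB, decide_eq_true_eq] at this
      omega
    · intro h kv hkv
      have hv : kv.2 = pvGet0 a kv.1 :=
        (pvGet0_of_mem a kv.1 kv.2 hna (by simpa using List.mem_of_mem_filter hkv)).symm
      have hz : kv.2 ≠ 0 := by simpa using List.of_mem_filter hkv
      simp only [hgdB, decide_eq_true_eq]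
      have := h kv.1 (hv ▸ hz)
      omega
  have hany2 : ((b.filter (fun kv => kv.2 ≠ 0)).any
      (fun kv => kv.2 < (PySem.Dict.mk (a.filter (fun kv => kv.2 ≠ 0))).getD kv.1 0)) = false ↔
      ∀ p, pvGet0 b p ≠ 0 → ¬ pvGet0 b p < pvGet0 a p := by
    rw [List.any_eq_false]
    constructor
    · intro h p hp
      have hmem : (p, pvGet0 b p) ∈ b.filter (fun kv => kv.2 ≠ 0) :=
        List.mem_filter.mpr ⟨mem_of_pvGet0_ne b p hp, by simp [hp]⟩
      have := h _ hmem
      simp only [hgdA, decide_eq_true_eq] at this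
      omega
    · intro h kv hkv
      have hv : kv.2 = pvGet0 b kv.1 :=
        (pvGet0_of_mem b kv.1 kv.2 hnb (by simpa using List.mem_of_mem_filter hkv)).symm
      have hz : kv.2 ≠ 0 := by simpa using List.of_mem_filter hkv
      simp only [hgdA, decide_eq_true_eq]
      have := h kv.1 (hv ▸ hz)
      omega
  constructor
  · intro hB
    by_cases h1 : ((a.filter (fun kv => kv.2 ≠ 0)).any
        (fun kv => kv.2 > (PySem.Dict.mk (b.filter (fun kv => kv.2 ≠ 0))).getD kv.1 0)) = true
    · rw [if_pos h1] at hB; exact absurd hB (by simp)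
    · rw [if_neg h1] at hB
      by_cases h2 : ((b.filter (fun kv => kv.2 ≠ 0)).any
          (fun kv => kv.2 < (PySem.Dict.mk (a.filter (fun kv => kv.2 ≠ 0))).getD kv.1 0)) = true
      · rw [if_pos h2] at hB; exact absurd hB (by simp)
      · rw [if_neg h2] at hB
        rw [Bool.not_eq_true] at h1 h2
        have hle1 := hany1.mp h1
        have hle2 := hany2.mp h2
        have hle : ∀ p, pvGet0 a p ≤ pvGet0 b p := by
          intro p
          by_cases hz : pvGet0 a p = 0
          · rw [hz]
            by_contra hlt
            have hbz : pvGet0 b p ≠ 0 := by omega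
            exact hle2 p hbz (by omega)
          · exact hle1 p hz
        refine ⟨hle, ?_⟩
        by_contra hall
        push_neg at hall
        have heq : pyDictEq (PySem.Dict.mk (a.filter (fun kv => kv.2 ≠ 0)))
            (PySem.Dict.mk (b.filter (fun kv => kv.2 ≠ 0))) = true :=
          (pyDictEq_iff a b hna hnb).mpr hall
        rw [heq] at hB
        simp at hB
  · rintro ⟨hle, p, hne⟩
    rw [if_neg (by
        rw [Bool.not_eq_true]
        exact hany1.mpr (fun q _ => hle q)),
      if_neg (by
        rw [Bool.not_eq_true]
        refine hany2.mpr (fun q _ hlt => ?_)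
        have := hle q
        omega)]
    rw [Bool.not_eq_true', Bool.eq_false_iff]
    intro heq
    exact hne (((pyDictEq_iff a b hna hnb).mp heq) p)

-- ===== VERDICT (by name: the statement is the Claim_ definition above) =====
theorem clock_is_before_py_spec : Claim_equal_clock_is_before_py := by
  intro a b _ hpre
  unfold Spec_clock_is_before_py
  rw [Bool.eq_iff_iff, A_iff a b, B_iff a b hpre.1 hpre.2]
  constructor
  · rintro ⟨hle, p, hlt⟩
    exact ⟨hle, p, by omega⟩
  · rintro ⟨hle, p, hne⟩
    exact ⟨hle, p, lt_of_le_of_ne (hle p) hne⟩
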